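-- pv_equiv track=rewrite | github.com/danilodcn/universidade-backend | app/app.py | busca_por_items
-- ===== SOURCE A (Python) =====
-- def busca_por_items(termos_busca: dict, dicionarios: list):
--
--     def busca_item(nome, valor):
--         r = []
--         for dic in dicionarios:
--             try:
--                 if dic[nome] == valor:
--                     # import ipdb; ipdb.set_trace()
--                     r.append(dic)
--             except KeyError:
--                 continue
--         return r
--
--     # import ipdb; ipdb.set_trace()
--     for key, valor in termos_busca.items():
--         retorno = []
--         item = busca_item(key, valor)
--         if item != None:
--             retorno.extend(item)
--
--         dicionarios = retorno
--         if dicionarios == {}: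
--             return []
--
--     return dicionarios
-- ===== SOURCE B (Python) =====
-- _MISS = object()
--
--
-- def busca_por_items(termos_busca: dict, dicionarios: list):
--     return [
--         dic
--         for dic in dicionarios
--         if all(dic.get(key, _MISS) == valor for key, valor in termos_busca.items())
--     ]
-- ===== Notes on version B (the rewrite author's own statement) =====
-- stated objective: simpler
-- what changed: Replaces A's per-term narrowing passes (helper rebuilding a new list for each search term) by a single list comprehension that keeps a dict iff every term matches at once, missing keys handled by a sentinel default instead of try/except KeyError.
import Mathlib
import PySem

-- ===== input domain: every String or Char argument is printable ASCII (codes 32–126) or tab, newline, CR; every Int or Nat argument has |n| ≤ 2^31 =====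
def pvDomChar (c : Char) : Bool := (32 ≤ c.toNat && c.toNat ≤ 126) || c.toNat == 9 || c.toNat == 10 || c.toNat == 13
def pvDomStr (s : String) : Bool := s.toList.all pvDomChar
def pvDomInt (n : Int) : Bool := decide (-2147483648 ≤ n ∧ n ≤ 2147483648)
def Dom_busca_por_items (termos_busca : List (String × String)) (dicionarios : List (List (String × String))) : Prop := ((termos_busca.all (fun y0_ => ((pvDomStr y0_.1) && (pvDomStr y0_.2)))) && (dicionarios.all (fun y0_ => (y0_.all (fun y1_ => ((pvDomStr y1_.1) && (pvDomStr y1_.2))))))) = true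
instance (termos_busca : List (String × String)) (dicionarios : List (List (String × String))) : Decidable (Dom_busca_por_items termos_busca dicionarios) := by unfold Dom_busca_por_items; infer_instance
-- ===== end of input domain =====

-- B replaces A's per-term narrowing passes by a single filter that checks all terms per dict (objective: simpler).

-- ===== PORT A =====
-- inner helper busca_item(nome, valor): try dic[nome] == valor → append; KeyError → continue
def pvBuscaItem (dicionarios : List (List (String × String))) (nome valor : String) :
    List (List (String × String)) :=
  dicionarios.foldl (fun r dic =>
    match (PySem.Dict.ofList dic).get? nome with
    | none => r                    -- KeyError: continue
    | some v => if v == valor then r ++ [dic] else r) []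

def busca_por_items (termos_busca : List (String × String)) (dicionarios : List (List (String × String))) : List (List (String × String)) :=
  -- for key, valor in termos_busca.items(): retorno = []; item = busca_item(key, valor);
  -- `item != None` is always True (busca_item returns a list), so retorno.extend(item);
  -- `dicionarios == {}` compares a list to a dict and is always False, so the early return never fires.
  ((PySem.Dict.ofList termos_busca).items).foldl
    (fun dics kv => [] ++ pvBuscaItem dics kv.1 kv.2) dicionarios

-- ===== PORT B =====
-- [dic for dic in dicionarios if all(dic.get(key, _MISS) == valor for key, valor in termos_busca.items())]
-- dic.get(key, _MISS) == valor  ⟺  get? key = some valor (the sentinel never equals a string)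
def busca_por_items_alt (termos_busca : List (String × String)) (dicionarios : List (List (String × String))) : List (List (String × String)) :=
  dicionarios.filter (fun dic =>
    ((PySem.Dict.ofList termos_busca).items).all
      (fun kv => (PySem.Dict.ofList dic).get? kv.1 == some kv.2))

-- ===== PRECONDITION & SPEC =====
def Spec_busca_por_items (termos_busca : List (String × String)) (dicionarios : List (List (String × String))) (out : List (List (String × String))) : Prop := out = busca_por_items_alt termos_busca dicionarios
instance (termos_busca : List (String × String)) (dicionarios : List (List (String × String))) (out : List (List (String × String))) : Decidable (Spec_busca_por_items termos_busca dicionarios out) := by unfold Spec_busca_por_items; infer_instance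

-- ===== CLAIM (what is proved, stated in full; the proofs are below) =====
def Claim_equal_busca_por_items : Prop := ∀ (termos_busca : List (String × String)) (dicionarios : List (List (String × String))), Dom_busca_por_items termos_busca dicionarios → Spec_busca_por_items termos_busca dicionarios (busca_por_items termos_busca dicionarios)

-- ===== LEMMAS AND PROOFS =====

-- one narrowing pass of A is a filter by that single term
theorem pvBuscaItem_eq_filter (nome valor : String) :
    ∀ (ds : List (List (String × String))) (r : List (List (String × String))),
      ds.foldl (fun r dic =>
        match (PySem.Dict.ofList dic).get? nome with
        | none => r
        | some v => if v == valor then r ++ [dic] else r) r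
      = r ++ ds.filter (fun dic => (PySem.Dict.ofList dic).get? nome == some valor) := by
  intro ds
  induction ds with
  | nil => intro r; simp
  | cons dic ds ih =>
    intro r
    simp only [List.foldl_cons, List.filter_cons]
    rw [ih]
    cases h : (PySem.Dict.ofList dic).get? nome with
    | none => simp [h]
    | some v =>
      by_cases hv : v == valor
      · simp [h, hv]
      · simp [h, hv]

theorem pvFold_eq_filter_all :
    ∀ (ts : List (String × String)) (ds : List (List (String × String))),
      ts.foldl (fun dics kv => [] ++ pvBuscaItem dics kv.1 kv.2) ds
      = ds.filter (fun dic =>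
          ts.all (fun kv => (PySem.Dict.ofList dic).get? kv.1 == some kv.2)) := by
  intro ts
  induction ts with
  | nil => intro ds; simp
  | cons kv ts ih =>
    intro ds
    simp only [List.foldl_cons]
    rw [show [] ++ pvBuscaItem ds kv.1 kv.2 = pvBuscaItem ds kv.1 kv.2 from rfl]
    rw [show pvBuscaItem ds kv.1 kv.2
        = ds.filter (fun dic => (PySem.Dict.ofList dic).get? kv.1 == some kv.2) from
      pvBuscaItem_eq_filter kv.1 kv.2 ds []]
    rw [ih, List.filter_filter]
    apply List.filter_congr
    intro dic _
    simp [List.all_cons, Bool.and_comm]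

-- ===== VERDICT (by name: the statement is the Claim_ definition above) =====
theorem busca_por_items_spec : Claim_equal_busca_por_items := by
  intro termos_busca dicionarios _
  show busca_por_items termos_busca dicionarios = busca_por_items_alt termos_busca dicionarios
  unfold busca_por_items busca_por_items_alt
  exact pvFold_eq_filter_all _ _
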